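-- pv_equiv track=rewrite | github.com/florinacho337/Programare | PycharmProjects/Lab2-tema/main.py | proprietate1
-- ===== SOURCE A (Python) =====
-- def relativ_prim_intre_ele(a, b):
--     while b:
--         aux = a % b
--         a = b
--         b = aux
--     return a == 1
--
-- def proprietate1(lst):
--     i = 0
--     f = 1
--     lungime_max = 1
--     while f <= len(lst):
--         if f < len(lst) and relativ_prim_intre_ele(lst[f - 1], lst[f]):
--             f = f + 1
--         else:
--             lungime = f - i
--             if lungime > lungime_max:
--                 lungime_max = lungime
--                 rez = lst[i: f]
--             i = f
--             f = i + 1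
--     return rez
-- ===== SOURCE B (Python) =====
-- def _coprim(a, b):
--     return a == 1 if b == 0 else _coprim(b, a % b)
--
-- def proprietate1(lst):
--     n = len(lst)
--     # pass 1: explicit structure — coprimality flag per adjacent pair, then maximal-run boundaries
--     flags = [_coprim(lst[k], lst[k + 1]) for k in range(n - 1)]
--     segs = []
--     start = 0
--     for k, ok in enumerate(flags):
--         if not ok:
--             segs.append((start, k + 1))
--             start = k + 1
--     segs.append((start, n))
--     # pass 2: pick the first run strictly longer than 1 element that beats the running max
--     rez = None
--     best = 1
--     for s, e in segs:
--         if e - s > best: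
--             best = e - s
--             rez = lst[s:e]
--     if rez is None:
--         raise ValueError("no adjacent coprime pair")
--     return rez
-- ===== Notes on version B (the rewrite author's own statement) =====
-- stated objective: alternative
-- what changed: Replaces A's single interleaved while-loop (which tracks i/f cursors and closes runs on the fly) by two separate passes: first build the explicit list of adjacent-coprimality flags and the (start,end) boundaries of maximal runs, then scan that run list for the first run longer than the running max; B raises ValueError (instead of A's UnboundLocalError) outside the stated precondition.
import Mathlib
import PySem

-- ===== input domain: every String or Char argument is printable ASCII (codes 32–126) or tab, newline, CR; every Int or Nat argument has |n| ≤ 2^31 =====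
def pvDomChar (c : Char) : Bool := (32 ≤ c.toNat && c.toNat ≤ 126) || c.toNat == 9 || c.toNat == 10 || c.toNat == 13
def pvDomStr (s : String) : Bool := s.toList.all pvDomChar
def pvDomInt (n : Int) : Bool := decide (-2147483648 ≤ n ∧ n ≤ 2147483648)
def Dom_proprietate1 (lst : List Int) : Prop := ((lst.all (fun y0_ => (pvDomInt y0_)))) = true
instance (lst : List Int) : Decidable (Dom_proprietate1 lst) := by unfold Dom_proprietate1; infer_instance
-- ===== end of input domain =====

-- B replaces A's interleaved run-tracking while-loop by two passes (flags + run boundaries, then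
-- a scan for the first run beating the running max); equivalence on inputs with a coprime adjacent pair.


-- Python's a % b has |a % b| < |b| when b ≠ 0 (needed for Euclid termination).
theorem pvModAbsLt (a b : Int) (hb : b ≠ 0) : (PySem.Int.mod a b).natAbs < b.natAbs := by
  rcases lt_or_gt_of_ne hb with h | h
  · have := PySem.Int.mod_neg_bounds a h
    omega
  · have h1 := PySem.Int.mod_nonneg a h
    have h2 := PySem.Int.mod_lt a h
    omega

-- ===== PORT A =====
-- while b: aux = a % b; a = b; b = aux
def gcdLoopA (a b : Int) : Int :=
  if hb : b ≠ 0 then gcdLoopA b (PySem.Int.mod a b) else a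
termination_by b.natAbs
decreasing_by exact pvModAbsLt a b hb

def relativ_prim_intre_ele (a b : Int) : Bool := gcdLoopA a b == 1

-- A's while-loop: state (i, f, lungime_max, rez); f increases by 1 every iteration.
def loopA (lst : List Int) (i f lmax : Int) (rez : Option (List Int)) : Option (List Int) :=
  if h : f ≤ (lst.length : Int) then
    if f < (lst.length : Int) &&
        relativ_prim_intre_ele (PySem.List.pyGetD lst (f - 1) 0) (PySem.List.pyGetD lst f 0) then
      loopA lst i (f + 1) lmax rez
    else
      let lungime := f - i
      if lmax < lungime then
        loopA lst f (f + 1) lungime (some (PySem.List.slice lst (some i) (some f)))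
      else
        loopA lst f (f + 1) lmax rez
  else rez
termination_by ((lst.length : Int) + 1 - f).toNat
decreasing_by all_goals omega

-- 'return rez' raises UnboundLocalError when rez was never assigned: excluded by Pre_ (port returns []).
def proprietate1 (lst : List Int) : List Int := (loopA lst 0 1 1 none).getD []

-- ===== PORT B =====
def coprimB (a b : Int) : Bool :=
  if hb : b = 0 then a == 1 else coprimB b (PySem.Int.mod a b)
termination_by b.natAbs
decreasing_by exact pvModAbsLt a b hb

def flagsB (lst : List Int) : List Bool :=
  (PySem.List.pyRange 0 ((lst.length : Int) - 1) 1).map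
    (fun k => coprimB (PySem.List.pyGetD lst k 0) (PySem.List.pyGetD lst (k + 1) 0))

def segStep (st : List (Int × Int) × Int) (kv : Int × Bool) : List (Int × Int) × Int :=
  if !kv.2 then (st.1 ++ [(st.2, kv.1 + 1)], kv.1 + 1) else st

def segsB (lst : List Int) : List (Int × Int) :=
  let p := (PySem.List.enumerate (flagsB lst) 0).foldl segStep ([], 0)
  p.1 ++ [(p.2, (lst.length : Int))]

def bestStep (lst : List Int) (st : Option (List Int) × Int) (se : Int × Int) :
    Option (List Int) × Int :=
  if st.2 < se.2 - se.1 then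
    (some (PySem.List.slice lst (some se.1) (some se.2)), se.2 - se.1)
  else st

-- 'raise ValueError' when rez is None: excluded by Pre_ (port returns []).
def proprietate1_alt (lst : List Int) : List Int :=
  (((segsB lst).foldl (bestStep lst) (none, 1)).1).getD []

-- ===== PRECONDITION & SPEC =====
-- Pre_ excludes exactly the inputs on which Python A raises UnboundLocalError (rez never assigned):
-- those with no adjacent coprime pair. A's Euclid on (x, y) ends in 1 iff y = 0 ∧ x = 1, or y > 0
-- with gcd(x, y) = 1 (for y < 0 Python's floor-mod keeps every remainder nonpositive).
def Pre_proprietate1 (lst : List Int) : Prop :=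
  ((List.range (lst.length - 1)).any (fun k =>
    (lst.getD (k + 1) 0 == 0 && lst.getD k 0 == 1) ||
    (decide (0 < lst.getD (k + 1) 0) && Int.gcd (lst.getD k 0) (lst.getD (k + 1) 0) == 1))) = true
instance (lst : List Int) : Decidable (Pre_proprietate1 lst) := by
  unfold Pre_proprietate1; infer_instance

def pvWitness_proprietate1 : List Int := [2, 3, 4]

def Spec_proprietate1 (lst : List Int) (out : List Int) : Prop := out = proprietate1_alt lst
instance (lst : List Int) (out : List Int) : Decidable (Spec_proprietate1 lst out) := by
  unfold Spec_proprietate1; infer_instance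

-- ===== CLAIM (what is proved, stated in full; the proofs are below) =====
def Claim_equal_proprietate1 : Prop :=
  ∀ (lst : List Int), Dom_proprietate1 lst → Pre_proprietate1 lst →
    Spec_proprietate1 lst (proprietate1 lst)

-- ===== LEMMAS AND PROOFS =====

theorem coprim_eq (a b : Int) : relativ_prim_intre_ele a b = coprimB a b := by
  unfold relativ_prim_intre_ele
  fun_induction coprimB a b
  case case1 x =>
    unfold gcdLoopA
    simp
  case case2 hb ih =>
    rw [gcdLoopA, dif_pos hb]
    exact ih

-- producer spec: maximal-run boundaries from a flag suffix starting at index k with open start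
def segsAux (fl : List Bool) (k start : Int) : List (Int × Int) × Int :=
  match fl with
  | [] => ([], start)
  | b :: rest =>
    if b then segsAux rest (k + 1) start
    else
      let p := segsAux rest (k + 1) (k + 1)
      ((start, k + 1) :: p.1, p.2)

theorem segsFold (fl : List Bool) (k start : Int) (acc : List (Int × Int)) :
    (PySem.List.enumerate fl k).foldl segStep (acc, start) =
      (acc ++ (segsAux fl k start).1, (segsAux fl k start).2) := by
  induction fl generalizing k start acc with
  | nil => simp [segsAux, PySem.List.enumerate_nil]
  | cons b rest ih =>
    rw [PySem.List.enumerate_cons]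
    cases b <;> simp only [List.foldl_cons, segStep, segsAux, Bool.not_true, Bool.not_false,
      Bool.false_eq_true, if_false, if_true, ih] <;> simp [segsAux]

theorem flagsB_eq (lst : List Int) :
    flagsB lst = (List.range (lst.length - 1)).map
      (fun j => coprimB (lst.getD j 0) (lst.getD (j + 1) 0)) := by
  unfold flagsB
  cases lst with
  | nil => simp [PySem.List.pyRange]
  | cons x xs =>
    have h : ((x :: xs).length : Int) - 1 = ((xs.length : Nat) : Int) := by
      simp
    rw [h, PySem.List.pyRange_zero_natCast]
    simp only [List.map_map]
    apply List.map_congr_left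
    intro j hj
    simp only [Function.comp_apply, PySem.List.pyGetD_natCast]
    have : ((j : Int) + 1) = ((j + 1 : Nat) : Int) := by push_cast; ring
    rw [this, PySem.List.pyGetD_natCast]

theorem flagsB_length (lst : List Int) : (flagsB lst).length = lst.length - 1 := by
  rw [flagsB_eq]; simp

theorem flagsB_drop (lst : List Int) (j : Nat) (hj : j < lst.length - 1) :
    (flagsB lst).drop j =
      coprimB (lst.getD j 0) (lst.getD (j + 1) 0) :: (flagsB lst).drop (j + 1) := by
  have hlen : j < (flagsB lst).length := by rw [flagsB_length]; omega
  rw [List.drop_eq_getElem_cons hlen]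
  congr 1
  apply Option.some.inj
  rw [← List.getElem?_eq_getElem hlen, flagsB_eq]
  simp [hj]

-- loop ↔ produce-then-consume fusion: from state (i, f = j+1), A's loop equals folding the
-- best-update over the remaining segments.
theorem loopA_eq (lst : List Int) (j : Nat) (i lmax : Int) (rez : Option (List Int))
    (hj : j < lst.length) :
    loopA lst i ((j : Int) + 1) lmax rez =
      (((segsAux ((flagsB lst).drop j) (j : Int) i).1 ++
          [((segsAux ((flagsB lst).drop j) (j : Int) i).2, (lst.length : Int))]).foldl
        (bestStep lst) (rez, lmax)).1 := by
  induction hn : lst.length - j generalizing j i lmax rez with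
  | zero => omega
  | succ m ih =>
    have hle : ((j : Int) + 1) ≤ (lst.length : Int) := by omega
    rw [loopA, dif_pos hle]
    have hidx : PySem.List.pyGetD lst ((j : Int) + 1 - 1) 0 = lst.getD j 0 := by
      have : ((j : Int) + 1 - 1) = ((j : Nat) : Int) := by ring
      rw [this, PySem.List.pyGetD_natCast]
    have hidx2 : PySem.List.pyGetD lst ((j : Int) + 1) 0 = lst.getD (j + 1) 0 := by
      have : ((j : Int) + 1) = (((j + 1 : Nat)) : Int) := by push_cast; ring
      rw [this, PySem.List.pyGetD_natCast]
    rw [hidx, hidx2, coprim_eq]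
    have hcast : ((j : Int) + 1 + 1) = (((j + 1 : Nat)) : Int) + 1 := by push_cast; ring
    by_cases hlast : j + 1 < lst.length
    · -- not the last iteration: flags[j] exists
      have hjf : j < lst.length - 1 := by omega
      rw [flagsB_drop lst j hjf]
      have hlt : ((j : Int) + 1) < (lst.length : Int) := by omega
      cases hfl : coprimB (lst.getD j 0) (lst.getD (j + 1) 0) with
      | true =>
        simp only [hlt, decide_true, Bool.true_and, if_true]
        rw [hcast, ih (j + 1) i lmax rez hlast (by omega)]
        simp [segsAux]
      | false =>
        simp only [Bool.and_false, Bool.false_eq_true, if_false, segsAux]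
        rw [List.cons_append, List.foldl_cons]
        have hstep : bestStep lst (rez, lmax) (i, (j : Int) + 1) =
            if lmax < (j : Int) + 1 - i then
              (some (PySem.List.slice lst (some i) (some ((j : Int) + 1))), (j : Int) + 1 - i)
            else (rez, lmax) := by
          simp [bestStep]
        by_cases hb : lmax < (j : Int) + 1 - i
        · rw [if_pos hb]
          rw [hcast, ih (j + 1) ((j : Int) + 1) ((j : Int) + 1 - i)
                (some (PySem.List.slice lst (some i) (some ((j : Int) + 1)))) hlast (by omega)]
          rw [hstep, if_pos hb]
          push_cast
          ring_nf
        · rw [if_neg hb]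
          rw [hcast, ih (j + 1) ((j : Int) + 1) lmax rez hlast (by omega)]
          rw [hstep, if_neg hb]
          push_cast
          ring_nf
    · -- last iteration: f = lst.length, the final segment is closed and the loop exits
      have hdrop : (flagsB lst).drop j = [] := by
        apply List.drop_eq_nil_of_le
        rw [flagsB_length]; omega
      rw [hdrop]
      simp only [segsAux]
      have hfn : ((j : Int) + 1) = (lst.length : Int) := by omega
      have hnotlt : ¬ (((j : Int) + 1) < (lst.length : Int)) := by omega
      simp only [hnotlt, decide_false, Bool.false_and, Bool.false_eq_true, if_false]
      rw [List.nil_append, List.foldl_cons, List.foldl_nil]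
      have hstep : bestStep lst (rez, lmax) (i, (lst.length : Int)) =
          if lmax < (lst.length : Int) - i then
            (some (PySem.List.slice lst (some i) (some (lst.length : Int))), (lst.length : Int) - i)
          else (rez, lmax) := by simp [bestStep]
      rw [hstep]
      have hexit : ¬ (((lst.length : Int) + 1) ≤ (lst.length : Int)) := by omega
      rw [hfn]
      by_cases hb : lmax < (lst.length : Int) - i
      · rw [if_pos hb, if_pos hb, loopA, dif_neg hexit]
      · rw [if_neg hb, if_neg hb, loopA, dif_neg hexit]

theorem pre_length (lst : List Int) (h : Pre_proprietate1 lst) : 1 ≤ lst.length := by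
  unfold Pre_proprietate1 at h
  by_contra hc
  have : lst.length - 1 = 0 := by omega
  simp [this] at h

-- ===== VERDICT (by name: the statement is the Claim_ definition above) =====
theorem proprietate1_spec : Claim_equal_proprietate1 := by
  intro lst _ hpre
  unfold Spec_proprietate1 proprietate1 proprietate1_alt segsB
  have hn := pre_length lst hpre
  have h01 : ((0 : Nat) : Int) + 1 = (1 : Int) := by norm_num
  have h := loopA_eq lst 0 0 1 none (by omega)
  rw [h01] at h
  rw [h, segsFold]
  simp
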